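-- pv_equiv track=rewrite | github.com/yunqiqiliang/clickzzetta_aisql | scripts/batch_fix_stream.py | process_stream_loop
-- ===== SOURCE A (Python) =====
-- def process_stream_loop(lines, start_idx):
--     """处理一个流式循环块"""
--     result_lines = []
--     i = start_idx
--
--     # 获取缩进级别
--     indent_line = lines[i]
--     indent = len(indent_line) - len(indent_line.lstrip())
--     base_indent = ' ' * indent
--
--     # 跳过 for 行
--     i += 1
--
--     # 处理循环体
--     while i < len(lines):
--         line = lines[i]
--
--         # 如果到达非缩进行，循环结束
--         if line.strip() and not line.startswith(base_indent + '    '):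
--             break
--
--         # 移除一层缩进（4个空格）
--         if line.startswith(base_indent + '    '):
--             new_line = base_indent + line[len(base_indent) + 4:]
--
--             # 特殊处理内容获取逻辑
--             if 'content = response.output.choices[0].message.content' in line:
--                 # 跳过这行
--                 i += 1
--                 continue
--             elif 'if content: full_content += content' in line:
--                 # 替换为正确的内容获取逻辑
--                 result_lines.append(base_indent + '        if hasattr(response.output.choices[0].message, \'content\'):')
--                 result_lines.append(base_indent + '            full_content = response.output.choices[0].message.content or ""')
--                 result_lines.append(base_indent + '        else:')
--                 result_lines.append(base_indent + '            full_content = ""')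
--                 i += 1
--                 continue
--             else:
--                 result_lines.append(new_line)
--         else:
--             # 空行或其他，保持原样
--             result_lines.append(line)
--
--         i += 1
--
--     return result_lines, i
-- ===== SOURCE B (Python) =====
-- def process_stream_loop(lines, start_idx):
--     """Two sequential passes: first find the block's end index, then transform lines[start_idx+1:end]."""
--     indent_line = lines[start_idx]
--     base_indent = ' ' * (len(indent_line) - len(indent_line.lstrip()))
--     child = base_indent + '    '
--
--     # pass 1: find end of the block
--     end = start_idx + 1
--     while end < len(lines) and not (lines[end].strip() and not lines[end].startswith(child)):
--         end += 1
--
--     # pass 2: transform each line of the block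
--     result_lines = []
--     for j in range(start_idx + 1, end):
--         line = lines[j]
--         if not line.startswith(child):
--             result_lines.append(line)
--         elif 'content = response.output.choices[0].message.content' in line:
--             pass
--         elif 'if content: full_content += content' in line:
--             result_lines.extend([
--                 base_indent + '        if hasattr(response.output.choices[0].message, \'content\'):',
--                 base_indent + '            full_content = response.output.choices[0].message.content or ""',
--                 base_indent + '        else:',
--                 base_indent + '            full_content = ""',
--             ])
--         else:
--             result_lines.append(base_indent + line[len(base_indent) + 4:])
--     return result_lines, end
-- ===== Notes on version B (the rewrite author's own statement) =====
-- stated objective: alternative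
-- what changed: A's single interleaved while-loop (which both decides where the block ends and builds the rewritten lines as it goes) is split into two sequential passes: a scan that only computes the block's end index, then a separate loop over that index range that builds the transformed lines.
import Mathlib
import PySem

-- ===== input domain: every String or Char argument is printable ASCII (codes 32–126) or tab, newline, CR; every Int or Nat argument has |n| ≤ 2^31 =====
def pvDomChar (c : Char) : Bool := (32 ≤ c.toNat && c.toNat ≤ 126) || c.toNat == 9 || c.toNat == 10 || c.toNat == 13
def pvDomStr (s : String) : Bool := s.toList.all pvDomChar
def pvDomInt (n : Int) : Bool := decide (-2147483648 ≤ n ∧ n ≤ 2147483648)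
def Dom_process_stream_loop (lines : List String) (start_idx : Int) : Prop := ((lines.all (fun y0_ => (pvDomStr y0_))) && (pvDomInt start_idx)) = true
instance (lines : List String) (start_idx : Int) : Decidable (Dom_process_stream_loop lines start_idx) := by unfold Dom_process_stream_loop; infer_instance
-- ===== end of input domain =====

-- B replaces A's single interleaved scan by two sequential passes (find the block end, then transform
-- the slice); same return value (objective: alternative decomposition, no speed claim).

-- shared literal constants / helpers both Pythons compute identically
def pvPat1 : String := "content = response.output.choices[0].message.content"
def pvPat2 : String := "if content: full_content += content"
def pvBlock (base : String) : List String :=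
  [ base ++ "        if hasattr(response.output.choices[0].message, 'content'):"
  , base ++ "            full_content = response.output.choices[0].message.content or \"\""
  , base ++ "        else:"
  , base ++ "            full_content = \"\"" ]
-- base_indent = ' ' * (len(indent_line) - len(indent_line.lstrip()))
def pvBaseIndent (s : String) : String :=
  String.ofList (PySem.List.pyRepeat [' '] (PySem.Str.len s - PySem.Str.len (PySem.Str.lstrip s)))

-- ===== PORT A =====
-- A's while loop: state (result_lines, i); line = lines[i] (negative index wraps, in range under Pre_)
def pvLoopA (lines : List String) (base : String) (res : List String) (i : Int) :
    List String × Int :=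
  if h : i < (lines.length : Int) then
    if PySem.Str.strip ((PySem.List.pyGet? lines i).getD "") ≠ "" ∧
        PySem.Str.startswith ((PySem.List.pyGet? lines i).getD "") (base ++ "    ") = false then
      (res, i)
    else if PySem.Str.startswith ((PySem.List.pyGet? lines i).getD "") (base ++ "    ") then
      if PySem.Str.isIn pvPat1 ((PySem.List.pyGet? lines i).getD "") then
        pvLoopA lines base res (i + 1)
      else if PySem.Str.isIn pvPat2 ((PySem.List.pyGet? lines i).getD "") then
        pvLoopA lines base (res ++ pvBlock base) (i + 1)
      else
        pvLoopA lines base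
          (res ++ [base ++ PySem.Str.slice ((PySem.List.pyGet? lines i).getD "")
            (some (PySem.Str.len base + 4)) none]) (i + 1)
    else
      pvLoopA lines base (res ++ [(PySem.List.pyGet? lines i).getD ""]) (i + 1)
  else (res, i)
termination_by ((lines.length : Int) - i).toNat
decreasing_by all_goals omega

def process_stream_loop (lines : List String) (start_idx : Int) : List String × Int :=
  pvLoopA lines (pvBaseIndent ((PySem.List.pyGet? lines start_idx).getD "")) [] (start_idx + 1)

-- ===== PORT B =====
-- pass 1: advance end while the line is blank or indented inside the block
def pvFindEnd (lines : List String) (child : String) (e : Int) : Int :=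
  if h : e < (lines.length : Int) then
    if PySem.Str.strip ((PySem.List.pyGet? lines e).getD "") ≠ "" ∧
        PySem.Str.startswith ((PySem.List.pyGet? lines e).getD "") child = false then e
    else pvFindEnd lines child (e + 1)
  else e
termination_by ((lines.length : Int) - e).toNat
decreasing_by omega

-- pass 2: for j in range(start_idx+1, end): transform lines[j] and append
def pvFillB (lines : List String) (base child : String) (e : Int) (res : List String) (j : Int) :
    List String :=
  if h : j < e then
    pvFillB lines base child e
      (if PySem.Str.startswith ((PySem.List.pyGet? lines j).getD "") child = false then
        res ++ [(PySem.List.pyGet? lines j).getD ""]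
      else if PySem.Str.isIn pvPat1 ((PySem.List.pyGet? lines j).getD "") then res
      else if PySem.Str.isIn pvPat2 ((PySem.List.pyGet? lines j).getD "") then res ++ pvBlock base
      else res ++ [base ++ PySem.Str.slice ((PySem.List.pyGet? lines j).getD "")
        (some (PySem.Str.len base + 4)) none]) (j + 1)
  else res
termination_by (e - j).toNat
decreasing_by omega

def process_stream_loop_alt (lines : List String) (start_idx : Int) : List String × Int :=
  (pvFillB lines (pvBaseIndent ((PySem.List.pyGet? lines start_idx).getD ""))
      (pvBaseIndent ((PySem.List.pyGet? lines start_idx).getD "") ++ "    ")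
      (pvFindEnd lines (pvBaseIndent ((PySem.List.pyGet? lines start_idx).getD "") ++ "    ")
        (start_idx + 1)) [] (start_idx + 1),
   pvFindEnd lines (pvBaseIndent ((PySem.List.pyGet? lines start_idx).getD "") ++ "    ")
     (start_idx + 1))

-- ===== PRECONDITION & SPEC =====
-- Pre_ excludes exactly the inputs where Python raises IndexError on lines[start_idx]
def Pre_process_stream_loop (lines : List String) (start_idx : Int) : Prop :=
  -(lines.length : Int) ≤ start_idx ∧ start_idx < (lines.length : Int)
instance (lines : List String) (start_idx : Int) : Decidable (Pre_process_stream_loop lines start_idx) := by unfold Pre_process_stream_loop; infer_instance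
def pvWitness_process_stream_loop : List String × Int :=
  (["for chunk in stream:", "    content = response.output.choices[0].message.content", "    if content: full_content += content", "done"], 0)

def Spec_process_stream_loop (lines : List String) (start_idx : Int) (out : List String × Int) : Prop := out = process_stream_loop_alt lines start_idx
instance (lines : List String) (start_idx : Int) (out : List String × Int) : Decidable (Spec_process_stream_loop lines start_idx out) := by unfold Spec_process_stream_loop; infer_instance

-- ===== CLAIM (what is proved, stated in full; the proofs are below) =====
def Claim_equal_process_stream_loop : Prop := ∀ (lines : List String) (start_idx : Int), Dom_process_stream_loop lines start_idx → Pre_process_stream_loop lines start_idx → Spec_process_stream_loop lines start_idx (process_stream_loop lines start_idx)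

-- ===== LEMMAS AND PROOFS =====

theorem pvFindEnd_ge (lines : List String) (child : String) (e : Int) :
    e ≤ pvFindEnd lines child e := by
  fun_induction pvFindEnd lines child e with
  | case1 e h hc => exact le_refl e
  | case2 e h hc ih => omega
  | case3 e h => exact le_refl e

theorem pvLoopA_eq (lines : List String) (base : String) (res : List String) (i : Int) :
    pvLoopA lines base res i =
      (pvFillB lines base (base ++ "    ") (pvFindEnd lines (base ++ "    ") i) res i,
       pvFindEnd lines (base ++ "    ") i) := by
  fun_induction pvLoopA lines base res i
  · rename_i res i h hbrk
    rw [pvFindEnd, dif_pos h, if_pos hbrk]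
    rw [pvFillB, dif_neg (lt_irrefl i)]
  · rename_i res i h hbrk hsw hp1 ih
    have he : pvFindEnd lines (base ++ "    ") i = pvFindEnd lines (base ++ "    ") (i + 1) := by
      rw [pvFindEnd, dif_pos h, if_neg hbrk]
    have hge := pvFindEnd_ge lines (base ++ "    ") (i + 1)
    rw [he, ih]
    conv_rhs => rw [pvFillB, dif_pos (by omega : i < pvFindEnd lines (base ++ "    ") (i + 1))]
    rw [if_neg (by rw [hsw]; decide), if_pos hp1]
  · rename_i res i h hbrk hsw hp1 hp2 ih
    have he : pvFindEnd lines (base ++ "    ") i = pvFindEnd lines (base ++ "    ") (i + 1) := by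
      rw [pvFindEnd, dif_pos h, if_neg hbrk]
    have hge := pvFindEnd_ge lines (base ++ "    ") (i + 1)
    rw [he, ih]
    conv_rhs => rw [pvFillB, dif_pos (by omega : i < pvFindEnd lines (base ++ "    ") (i + 1))]
    rw [if_neg (by rw [hsw]; decide), if_neg hp1, if_pos hp2]
  · rename_i res i h hbrk hsw hp1 hp2 ih
    have he : pvFindEnd lines (base ++ "    ") i = pvFindEnd lines (base ++ "    ") (i + 1) := by
      rw [pvFindEnd, dif_pos h, if_neg hbrk]
    have hge := pvFindEnd_ge lines (base ++ "    ") (i + 1)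
    rw [he, ih]
    conv_rhs => rw [pvFillB, dif_pos (by omega : i < pvFindEnd lines (base ++ "    ") (i + 1))]
    rw [if_neg (by rw [hsw]; decide), if_neg hp1, if_neg hp2]
  · rename_i res i h hbrk hsw ih
    have he : pvFindEnd lines (base ++ "    ") i = pvFindEnd lines (base ++ "    ") (i + 1) := by
      rw [pvFindEnd, dif_pos h, if_neg hbrk]
    have hge := pvFindEnd_ge lines (base ++ "    ") (i + 1)
    rw [he, ih]
    conv_rhs => rw [pvFillB, dif_pos (by omega : i < pvFindEnd lines (base ++ "    ") (i + 1))]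
    rw [if_pos (Bool.eq_false_iff.mpr hsw)]
  · rename_i res i h
    rw [pvFindEnd, dif_neg h]
    rw [pvFillB, dif_neg (lt_irrefl i)]

theorem process_stream_loop_spec : Claim_equal_process_stream_loop := by
  intro lines start_idx _ _
  unfold Spec_process_stream_loop process_stream_loop process_stream_loop_alt
  exact pvLoopA_eq lines _ [] (start_idx + 1)
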